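-- pv_equiv track=rewrite | github.com/emarberg/stable-grothendieck | tests/test_peaks.py | is_weak_multipermutation
-- ===== SOURCE A (Python) =====
-- def is_weak_multipermutation(osp):
--     for a, part in enumerate(osp):
--         for i in range(len(part) - 1):
--             if part[i + 1] - part[i] == 1:
--                 p = part[i] - 1
--                 q = part[i + 1] + 1
--                 test = set()
--                 for b in range(a + 1):
--                     test |= set(osp[b])
--                 if p in test or q in test:
--                     return False
--     return True
-- ===== SOURCE B (Python) =====
-- def is_weak_multipermutation(osp):
--     seen = set()
--     for part in osp:
--         seen.update(part)
--         for x, y in zip(part, part[1:]):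
--             if y - x == 1 and (x - 1 in seen or y + 1 in seen):
--                 return False
--     return True
-- ===== Notes on version B (the rewrite author's own statement) =====
-- stated objective: alternative
-- what changed: B maintains a single incrementally-grown prefix-union set across the outer loop instead of rebuilding the union of all previous parts from scratch at every adjacent consecutive pair, and scans adjacent pairs with zip instead of index arithmetic.
import Mathlib
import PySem

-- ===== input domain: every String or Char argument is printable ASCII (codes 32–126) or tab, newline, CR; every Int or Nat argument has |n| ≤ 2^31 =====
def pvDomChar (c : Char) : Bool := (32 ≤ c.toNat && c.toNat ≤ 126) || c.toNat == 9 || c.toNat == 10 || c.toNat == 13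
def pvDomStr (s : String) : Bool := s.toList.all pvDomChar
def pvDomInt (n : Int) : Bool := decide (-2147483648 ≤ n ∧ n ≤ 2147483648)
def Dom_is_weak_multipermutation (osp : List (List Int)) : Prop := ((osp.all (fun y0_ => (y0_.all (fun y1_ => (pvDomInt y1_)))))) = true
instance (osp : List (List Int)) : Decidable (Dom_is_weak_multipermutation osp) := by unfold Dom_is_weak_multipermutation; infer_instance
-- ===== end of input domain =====

-- B maintains one incrementally-grown prefix-union set instead of rebuilding the union of
-- all earlier parts at every adjacent consecutive pair; proven equal to A.


-- ===== PORT A =====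
-- test = set(); for b in range(a+1): test |= set(osp[b])
def aTestSet (osp : List (List Int)) (a : Int) : PySem.Set Int :=
  (PySem.List.pyRange 0 (a + 1) 1).foldl
    (fun t b => PySem.Set.union t (PySem.Set.ofList (PySem.List.pyGetD osp b []))) PySem.Set.empty

-- body of the inner `for i in range(len(part) - 1)` loop (returning true = `return False`)
def aCheck (osp : List (List Int)) (a : Int) (part : List Int) (i : Int) : Bool :=
  if PySem.List.pyGetD part (i + 1) 0 - PySem.List.pyGetD part i 0 = 1 then
    let p := PySem.List.pyGetD part i 0 - 1
    let q := PySem.List.pyGetD part (i + 1) 0 + 1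
    let test := aTestSet osp a
    PySem.Set.contains test p || PySem.Set.contains test q
  else false

def aInner (osp : List (List Int)) (a : Int) (part : List Int) : Bool :=
  (PySem.List.pyRange 0 ((part.length : Int) - 1) 1).any (aCheck osp a part)

-- outer `for a, part in enumerate(osp)` loop with early `return False`
def aOuter (osp : List (List Int)) : List (Int × List Int) → Bool
  | [] => true
  | (a, part) :: rest => if aInner osp a part then false else aOuter osp rest

def is_weak_multipermutation (osp : List (List Int)) : Bool :=
  aOuter osp (PySem.List.enumerate osp)

-- ===== PORT B =====
-- `for x, y in zip(part, part[1:]): if y - x == 1 and (x-1 in seen or y+1 in seen)`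
def bPairs (seen : PySem.Set Int) (part : List Int) : Bool :=
  (part.zip (part.drop 1)).any (fun xy =>
    decide (xy.2 - xy.1 = 1) &&
      (PySem.Set.contains seen (xy.1 - 1) || PySem.Set.contains seen (xy.2 + 1)))

def bGo : PySem.Set Int → List (List Int) → Bool
  | _, [] => true
  | seen, part :: rest =>
    let seen' := PySem.Set.update seen part   -- seen.update(part)
    if bPairs seen' part then false else bGo seen' rest

def is_weak_multipermutation_alt (osp : List (List Int)) : Bool :=
  bGo PySem.Set.empty osp

-- ===== PRECONDITION & SPEC =====
def Spec_is_weak_multipermutation (osp : List (List Int)) (out : Bool) : Prop := out = is_weak_multipermutation_alt osp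
instance (osp : List (List Int)) (out : Bool) : Decidable (Spec_is_weak_multipermutation osp out) := by unfold Spec_is_weak_multipermutation; infer_instance

-- ===== CLAIM (what is proved, stated in full; the proofs are below) =====
def Claim_equal_is_weak_multipermutation : Prop := ∀ (osp : List (List Int)), Dom_is_weak_multipermutation osp → Spec_is_weak_multipermutation osp (is_weak_multipermutation osp)

-- ===== LEMMAS AND PROOFS =====

lemma any_congr_mem {α : Type} (l : List α) (p q : α → Bool) (h : ∀ a ∈ l, p a = q a) :
    l.any p = l.any q := by
  induction l with
  | nil => rfl
  | cons a l ih =>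
    simp only [List.any_cons, h a List.mem_cons_self,
      ih (fun b hb => h b (List.mem_cons_of_mem a hb))]

lemma pyGetD_append_lt (done suf : List (List Int)) (b : Int) (h0 : 0 ≤ b)
    (h1 : b < (done.length : Int)) :
    PySem.List.pyGetD (done ++ suf) b [] = PySem.List.pyGetD done b [] := by
  rw [PySem.List.pyGetD_eq_getElem (done ++ suf) [] h0 (by simp; omega),
    PySem.List.pyGetD_eq_getElem done [] h0 (by omega),
    List.getElem_append_left (by omega)]

lemma pyGetD_append_len (done : List (List Int)) (y : List Int) (suf : List (List Int)) :
    PySem.List.pyGetD (done ++ y :: suf) (done.length : Int) [] = y := by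
  rw [PySem.List.pyGetD_eq_getElem (done ++ y :: suf) [] (by positivity) (by simp)]
  simp

lemma any_range_nat_eq_any_zip (f : Int → Int → Bool) (l : List Int) :
    ((List.range (l.length - 1)).any (fun k => f (l.getD k 0) (l.getD (k + 1) 0)))
      = (l.zip (l.drop 1)).any (fun p => f p.1 p.2) := by
  induction l with
  | nil => rfl
  | cons x l ih =>
    cases l with
    | nil => rfl
    | cons y ys =>
      rw [show (x :: y :: ys).length - 1 = (y :: ys).length - 1 + 1 by simp,
        List.range_succ_eq_map, List.any_cons, List.any_map,
        any_congr_mem _ _ (fun k => f ((y :: ys).getD k 0) ((y :: ys).getD (k + 1) 0))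
          (fun k _ => by simp [Function.comp]),
        ih]
      rfl


-- membership in the fold of unions over an index list
lemma contains_foldl_union (osp : List (List Int)) (bs : List Int) (s : PySem.Set Int) (x : Int) :
    PySem.Set.contains
      (bs.foldl (fun t b => PySem.Set.union t (PySem.Set.ofList (PySem.List.pyGetD osp b []))) s) x
      = (PySem.Set.contains s x || bs.any (fun b => decide (x ∈ PySem.List.pyGetD osp b []))) := by
  induction bs generalizing s with
  | nil => simp
  | cons b bs ih =>
    simp only [List.foldl_cons, List.any_cons, ih]
    by_cases hx : x ∈ PySem.List.pyGetD osp b [] <;>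
      simp [PySem.Set.contains_iff, PySem.Set.mem_union, PySem.Set.mem_ofList, hx, Bool.or_assoc,
        Bool.or_comm] <;>
    by_cases hs : PySem.Set.contains s x = true <;>
      simp_all [PySem.Set.contains_iff]

-- membership over indices of a whole list = membership in its flatten
lemma any_range_mem_flatten (l : List (List Int)) (x : Int) :
    ((PySem.List.pyRange 0 (l.length : Int) 1).any
        (fun b => decide (x ∈ PySem.List.pyGetD l b []))) = decide (x ∈ l.flatten) := by
  rw [show ((PySem.List.pyRange 0 (l.length : Int) 1).any
        (fun b => decide (x ∈ PySem.List.pyGetD l b [])))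
      = (((PySem.List.pyRange 0 (l.length : Int) 1).map
            (fun j => PySem.List.pyGetD l j [])).any (fun part => decide (x ∈ part))) from by
    rw [List.any_map]; rfl]
  rw [PySem.List.map_pyGetD_pyRange_zero' l ([] : List Int)]
  simp [List.any_eq, List.mem_flatten]

-- the test set built at position `done.length` of `done ++ part :: rest`
lemma contains_aTestSet (done : List (List Int)) (part : List Int) (rest : List (List Int)) (x : Int) :
    PySem.Set.contains (aTestSet (done ++ part :: rest) (done.length : Int)) x
      = decide (x ∈ done.flatten ∨ x ∈ part) := by
  unfold aTestSet
  rw [contains_foldl_union,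
    PySem.List.pyRange_one_succ_right (by positivity : (0:Int) ≤ (done.length : Int)),
    List.any_append,
    any_congr_mem _ (fun b => decide (x ∈ PySem.List.pyGetD (done ++ part :: rest) b []))
      (fun b => decide (x ∈ PySem.List.pyGetD done b []))
      (fun b hb => by
        rw [PySem.List.mem_pyRange_one] at hb
        show decide (x ∈ PySem.List.pyGetD (done ++ part :: rest) b [])
          = decide (x ∈ PySem.List.pyGetD done b [])
        rw [pyGetD_append_lt done (part :: rest) b hb.1 hb.2]),
    any_range_mem_flatten]
  simp [pyGetD_append_len, Bool.decide_or, PySem.Set.empty]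

-- indexed inner loop = zip-of-adjacent-pairs loop
lemma any_range_eq_any_zip (f : Int → Int → Bool) (l : List Int) :
    ((PySem.List.pyRange 0 ((l.length : Int) - 1) 1).any
        (fun i => f (PySem.List.pyGetD l i 0) (PySem.List.pyGetD l (i + 1) 0)))
      = (l.zip (l.drop 1)).any (fun p => f p.1 p.2) := by
  rw [PySem.List.pyRange_one, List.any_map]
  have h1 : ((l.length : Int) - 1 - 0).toNat = l.length - 1 := by omega
  rw [h1]
  have h2 : ∀ (k : Nat), ((fun i => f (PySem.List.pyGetD l i 0) (PySem.List.pyGetD l (i + 1) 0)) ∘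
      (fun k : Nat => (0 : Int) + k)) k = f (l.getD k 0) (l.getD (k + 1) 0) := by
    intro k
    simp only [Function.comp]
    rw [show (0 : Int) + (k : Int) = ((k : Nat) : Int) by omega,
      show ((k : Nat) : Int) + 1 = ((k + 1 : Nat) : Int) by omega,
      PySem.List.pyGetD_natCast, PySem.List.pyGetD_natCast]
  rw [any_congr_mem _ _ _ (fun k _ => h2 k)]
  exact any_range_nat_eq_any_zip f l

lemma contains_update (s : PySem.Set Int) (part : List Int) (x : Int) :
    PySem.Set.contains (PySem.Set.update s part) x = (PySem.Set.contains s x || decide (x ∈ part)) := by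
  by_cases h1 : x ∈ s <;> by_cases h2 : x ∈ part <;>
    simp [PySem.Set.contains_iff, PySem.Set.mem_update, h1, h2]

lemma aInner_eq_bPairs (done : List (List Int)) (part : List Int) (rest : List (List Int))
    (seen : PySem.Set Int)
    (h : ∀ x : Int, PySem.Set.contains seen x = decide (x ∈ done.flatten)) :
    aInner (done ++ part :: rest) (done.length : Int) part = bPairs (PySem.Set.update seen part) part := by
  unfold aInner bPairs
  rw [show (aCheck (done ++ part :: rest) (done.length : Int) part)
      = (fun i => (fun x y => if y - x = 1 then
          (PySem.Set.contains (aTestSet (done ++ part :: rest) (done.length : Int)) (x - 1) ||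
           PySem.Set.contains (aTestSet (done ++ part :: rest) (done.length : Int)) (y + 1))
        else false) (PySem.List.pyGetD part i 0) (PySem.List.pyGetD part (i + 1) 0))
      from funext (fun i => rfl),
    any_range_eq_any_zip (fun x y => if y - x = 1 then
          (PySem.Set.contains (aTestSet (done ++ part :: rest) (done.length : Int)) (x - 1) ||
           PySem.Set.contains (aTestSet (done ++ part :: rest) (done.length : Int)) (y + 1))
        else false) part]
  refine any_congr_mem _ _ _ (fun p _ => ?_)
  simp only [contains_aTestSet, contains_update, h]
  by_cases hd : p.2 - p.1 = 1 <;> simp [hd, Bool.decide_or]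

lemma go_eq : ∀ (rest done : List (List Int)) (seen : PySem.Set Int),
    (∀ x : Int, PySem.Set.contains seen x = decide (x ∈ done.flatten)) →
    bGo seen rest = aOuter (done ++ rest) (PySem.List.enumerate rest (done.length : Int)) := by
  intro rest
  induction rest with
  | nil => intro done seen h; simp [bGo, PySem.List.enumerate_nil, aOuter]
  | cons part rest' ih =>
    intro done seen h
    rw [PySem.List.enumerate_cons]
    show (if bPairs (PySem.Set.update seen part) part then false
          else bGo (PySem.Set.update seen part) rest')
        = (if aInner (done ++ part :: rest') (done.length : Int) part then false
          else aOuter (done ++ part :: rest') (PySem.List.enumerate rest' ((done.length : Int) + 1)))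
    rw [aInner_eq_bPairs done part rest' seen h]
    by_cases hp : bPairs (PySem.Set.update seen part) part = true
    · simp [hp]
    · simp only [hp, if_false, Bool.false_eq_true]
      have h' : ∀ x : Int, PySem.Set.contains (PySem.Set.update seen part) x
          = decide (x ∈ (done ++ [part]).flatten) := by
        intro x
        rw [contains_update, h]
        simp [Bool.decide_or]
      have hrec := ih (done ++ [part]) (PySem.Set.update seen part) h'
      simpa using hrec

-- ===== VERDICT (by name: the statement is the Claim_ definition above) =====
theorem is_weak_multipermutation_spec : Claim_equal_is_weak_multipermutation := by
  intro osp _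
  unfold Spec_is_weak_multipermutation is_weak_multipermutation is_weak_multipermutation_alt
  have := go_eq osp [] PySem.Set.empty (by intro x; simp [PySem.Set.empty, PySem.Set.contains])
  simpa [PySem.List.enumerate] using this.symm
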